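-- pv_equiv track=rewrite | github.com/gianniboccazzi/Teoria-de-Algoritmos-1 | Practica-Parcial/dinamica.py | camino_operaciones_dinamico
-- ===== SOURCE A (Python) =====
-- def camino_operaciones_dinamico(k):
--     res = [0] * (k+1)
--     res[1] = 1
--     res[2] = 2
--     for i in range(3, k+1):
--         if i % 2 != 0:
--             res[i] = 1+ res[i-1]
--         else:
--             res[i] = 1 + min(res[i//2], res[i-1])
--     return res
-- ===== SOURCE B (Python) =====
-- def camino_operaciones_dinamico(k):
--     # closed form: for i >= 1 the DP value is floor(log2 i) + popcount(i)
--     return [0] + [(i.bit_length() - 1) + bin(i).count("1") for i in range(1, k + 1)]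
-- ===== Notes on version B (the rewrite author's own statement) =====
-- stated objective: simpler
-- what changed: Replaces the DP recurrence over previous array entries with the independent closed form floor(log2 i)+popcount(i) computed per element in one comprehension.
import Mathlib
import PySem

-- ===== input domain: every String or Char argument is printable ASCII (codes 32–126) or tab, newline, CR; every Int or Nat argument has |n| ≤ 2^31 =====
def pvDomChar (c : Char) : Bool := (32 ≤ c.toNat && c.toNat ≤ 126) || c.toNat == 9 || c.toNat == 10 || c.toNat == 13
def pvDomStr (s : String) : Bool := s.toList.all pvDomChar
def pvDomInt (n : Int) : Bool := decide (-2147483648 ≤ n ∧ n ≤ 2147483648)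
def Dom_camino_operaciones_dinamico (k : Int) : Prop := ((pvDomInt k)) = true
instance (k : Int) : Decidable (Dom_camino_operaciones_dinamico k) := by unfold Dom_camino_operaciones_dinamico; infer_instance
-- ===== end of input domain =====

-- B replaces the DP recurrence (each entry from earlier array entries) with the
-- independent closed form floor(log2 i) + popcount(i), computed per element; same O(k) cost.

-- ===== PORT A =====
-- loop body of A: indices are Python list indexing (pySetD/pyGetD are exact under Pre_, i ≥ 3 here)
def pvStepA (res : List Int) (i : Int) : List Int :=
  if PySem.Int.mod i 2 ≠ 0 then
    PySem.List.pySetD res i (1 + PySem.List.pyGetD res (i - 1) 0)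
  else
    PySem.List.pySetD res i
      (1 + min (PySem.List.pyGetD res (PySem.Int.floordiv i 2) 0) (PySem.List.pyGetD res (i - 1) 0))

def camino_operaciones_dinamico (k : Int) : List Int :=
  (PySem.List.pyRange 3 (k + 1) 1).foldl pvStepA
    (PySem.List.pySetD (PySem.List.pySetD (List.replicate (k + 1).toNat (0 : Int)) 1 1) 2 2)

-- ===== PORT B =====
-- Source B: [0] + [(i.bit_length() - 1) + bin(i).count("1") for i in range(1, k + 1)]
def camino_operaciones_dinamico_alt (k : Int) : List Int :=
  0 :: (PySem.List.pyRange 1 (k + 1) 1).map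
    (fun i => ((PySem.Int.bitLength i : Int) - 1) + (PySem.Int.bitCount i : Int))

-- ===== PRECONDITION & SPEC =====
-- Pre_ excludes exactly the inputs below two, on which A raises IndexError while assigning its base cases.
def Pre_camino_operaciones_dinamico (k : Int) : Prop := 2 ≤ k
instance (k : Int) : Decidable (Pre_camino_operaciones_dinamico k) := by
  unfold Pre_camino_operaciones_dinamico; infer_instance

def pvWitness_camino_operaciones_dinamico : Int := 5


def Spec_camino_operaciones_dinamico (k : Int) (out : List Int) : Prop := out = camino_operaciones_dinamico_alt k
instance (k : Int) (out : List Int) : Decidable (Spec_camino_operaciones_dinamico k out) := by unfold Spec_camino_operaciones_dinamico; infer_instance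

-- ===== CLAIM (what is proved, stated in full; the proofs are below) =====
def Claim_equal_camino_operaciones_dinamico : Prop := ∀ (k : Int), Dom_camino_operaciones_dinamico k → Pre_camino_operaciones_dinamico k → Spec_camino_operaciones_dinamico k (camino_operaciones_dinamico k)


-- ===== LEMMAS AND PROOFS =====

-- the closed form B computes, as a function of a Nat
def pvG (m : Nat) : Int :=
  ((PySem.Int.bitLength (m : Int) : Int) - 1) + (PySem.Int.bitCount (m : Int) : Int)

-- the value A's table holds at index m
def pvTgt (m : Nat) : Int := if m = 0 then 0 else pvG m

-- A's table after the loop has processed every index ≤ m (K = k.toNat)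
def pvSt (K m : Nat) : List Int := (List.range (m + 1)).map pvTgt ++ List.replicate (K - m) 0

theorem pvG_half (m : Nat) (h : m % 2 = 0) (h2 : 2 ≤ m) : pvG m = pvG (m / 2) + 1 := by
  unfold pvG
  rw [PySem.Int.bitLength_natCast (by omega : 0 < m), PySem.Int.bitCount_natCast (by omega : 0 < m)]
  omega

theorem pvG_odd (m : Nat) (h : m % 2 = 1) (h3 : 3 ≤ m) : pvG m = pvG (m - 1) + 1 := by
  unfold pvG
  rw [PySem.Int.bitLength_natCast (by omega : 0 < m), PySem.Int.bitCount_natCast (by omega : 0 < m),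
      PySem.Int.bitLength_natCast (by omega : 0 < m - 1), PySem.Int.bitCount_natCast (by omega : 0 < m - 1)]
  have hd : (m - 1) / 2 = m / 2 := by omega
  rw [hd]
  omega

theorem pvG_pred_ge : ∀ m, 2 ≤ m → pvG m ≤ pvG (m - 1) + 2 := by
  intro m
  induction m using Nat.strong_induction_on with
  | _ m ih =>
    intro h2
    rcases Nat.lt_or_ge m 3 with h3 | h3
    · have hm : m = 2 := by omega
      subst hm; decide
    · rcases Nat.mod_two_eq_zero_or_one m with hpar | hpar
      · -- m even, m ≥ 4
        have h4 : 4 ≤ m := by omega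
        have e1 : pvG m = pvG (m / 2) + 1 := pvG_half m hpar (by omega)
        have e2 : pvG (m - 1) = pvG (m - 1 - 1) + 1 := pvG_odd (m - 1) (by omega) (by omega)
        have e3 : pvG (m - 2) = pvG ((m - 2) / 2) + 1 := pvG_half (m - 2) (by omega) (by omega)
        have hd : (m - 2) / 2 = m / 2 - 1 := by omega
        have hih : pvG (m / 2) ≤ pvG (m / 2 - 1) + 2 := ih (m / 2) (by omega) (by omega)
        have hm12 : m - 1 - 1 = m - 2 := by omega
        rw [hm12] at e2
        rw [hd] at e3
        omega
      · rw [pvG_odd m hpar h3]; omega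

theorem pvG_even_min (m : Nat) (h : m % 2 = 0) (h4 : 4 ≤ m) :
    1 + min (pvG (m / 2)) (pvG (m - 1)) = pvG m := by
  have e1 : pvG m = pvG (m / 2) + 1 := pvG_half m h (by omega)
  have e2 : pvG (m - 1) = pvG (m - 1 - 1) + 1 := pvG_odd (m - 1) (by omega) (by omega)
  have hm12 : m - 1 - 1 = m - 2 := by omega
  rw [hm12] at e2
  have e3 : pvG (m - 2) = pvG ((m - 2) / 2) + 1 := pvG_half (m - 2) (by omega) (by omega)
  have hd : (m - 2) / 2 = m / 2 - 1 := by omega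
  rw [hd] at e3
  have h5 : pvG (m / 2) ≤ pvG (m / 2 - 1) + 2 := pvG_pred_ge (m / 2) (by omega)
  omega

theorem pvSt_getD (K m j : Nat) (hj : j ≤ m) : (pvSt K m).getD j 0 = pvTgt j := by
  unfold pvSt
  rw [List.getD_append _ _ _ j (by simp [List.length_map, List.length_range]; omega)]
  rw [List.getD_eq_getElem _ _ (by simp [List.length_map, List.length_range]; omega)]
  simp [List.getElem_map, List.getElem_range]

theorem pvSt_set (K m : Nat) (hK : m < K) :
    (pvSt K m).set (m + 1) (pvTgt (m + 1)) = pvSt K (m + 1) := by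
  unfold pvSt
  have hrep : K - m = (K - (m + 1)) + 1 := by omega
  rw [hrep, List.replicate_succ, List.set_append]
  rw [if_neg (by simp [List.length_map, List.length_range])]
  simp only [List.length_map, List.length_range, Nat.sub_self, List.set_cons_zero]
  rw [List.range_succ (n := m + 1), List.map_append]
  simp

theorem pvStep_st (K m : Nat) (h2 : 2 ≤ m) (hK : m < K) :
    pvStepA (pvSt K m) ((m : Int) + 1) = pvSt K (m + 1) := by
  unfold pvStepA
  have hc1 : ((m : Int) + 1) = ((m + 1 : Nat) : Int) := by push_cast; ring
  have hc2 : ((m + 1 : Nat) : Int) - 1 = ((m : Nat) : Int) := by push_cast; ring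
  rw [hc1, hc2]
  have hmod : PySem.Int.mod ((m + 1 : Nat) : Int) 2 = (((m + 1) % 2 : Nat) : Int) := by
    exact_mod_cast PySem.Int.mod_natCast (m + 1) 2
  have hdiv : PySem.Int.floordiv ((m + 1 : Nat) : Int) 2 = (((m + 1) / 2 : Nat) : Int) := by
    exact_mod_cast PySem.Int.floordiv_natCast (m + 1) 2
  rw [hmod, hdiv, PySem.List.pyGetD_natCast, PySem.List.pyGetD_natCast,
      PySem.List.pySetD_natCast, PySem.List.pySetD_natCast]
  rw [pvSt_getD K m m (le_refl m), pvSt_getD K m ((m + 1) / 2) (by omega)]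
  have htm : pvTgt m = pvG m := by unfold pvTgt; rw [if_neg (by omega)]
  have hth : pvTgt ((m + 1) / 2) = pvG ((m + 1) / 2) := by unfold pvTgt; rw [if_neg (by omega)]
  have htm1 : pvTgt (m + 1) = pvG (m + 1) := by unfold pvTgt; rw [if_neg (by omega)]
  rcases Nat.mod_two_eq_zero_or_one (m + 1) with hpar | hpar
  · rw [hpar]
    rw [if_neg (by norm_num)]
    have := pvG_even_min (m + 1) hpar (by omega)
    have hm1 : m + 1 - 1 = m := by omega
    rw [hm1] at this
    rw [htm, hth, ← pvSt_set K m hK, htm1, ← this]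
  · rw [hpar]
    rw [if_pos (by norm_num)]
    have := pvG_odd (m + 1) hpar (by omega)
    have hm1 : m + 1 - 1 = m := by omega
    rw [hm1] at this
    rw [htm, ← pvSt_set K m hK, htm1, this]
    ring_nf

theorem pvFold (K : Nat) : ∀ d m, 2 ≤ m → m + d = K →
    (PySem.List.pyRange ((m : Int) + 1) ((K : Int) + 1) 1).foldl pvStepA (pvSt K m) = pvSt K K := by
  intro d
  induction d with
  | zero =>
    intro m h2 hK
    have hm : m = K := by omega
    subst hm
    rw [PySem.List.pyRange_one_eq_nil (by omega)]
    rfl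
  | succ d ih =>
    intro m h2 hK
    rw [PySem.List.pyRange_one_cons (by omega)]
    simp only [List.foldl_cons]
    rw [pvStep_st K m h2 (by omega)]
    have hc : ((m : Int) + 1) + 1 = ((m + 1 : Nat) : Int) + 1 := by push_cast; ring
    rw [hc]
    exact ih (m + 1) (by omega) (by omega)

theorem pvInit (K : Nat) (h : 2 ≤ K) :
    PySem.List.pySetD (PySem.List.pySetD (List.replicate (K + 1) (0 : Int)) 1 1) 2 2 = pvSt K 2 := by
  obtain ⟨t, rfl⟩ : ∃ t, K = t + 2 := ⟨K - 2, by omega⟩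
  rw [PySem.List.pySetD_of_nonneg _ _ (by norm_num), PySem.List.pySetD_of_nonneg _ _ (by norm_num)]
  have h1 : (1 : Int).toNat = 1 := rfl
  have h2 : (2 : Int).toNat = 2 := rfl
  rw [h1, h2]
  have hmap : (List.range 3).map pvTgt = [0, 1, 2] := by decide
  unfold pvSt
  rw [hmap]
  simp [List.replicate_succ]

theorem pvFinal (K : Nat) :
    pvSt K K = 0 :: (PySem.List.pyRange 1 ((K : Int) + 1) 1).map
      (fun i => ((PySem.Int.bitLength i : Int) - 1) + (PySem.Int.bitCount i : Int)) := by
  unfold pvSt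
  rw [Nat.sub_self, List.replicate_zero, List.append_nil]
  rw [PySem.List.pyRange_one 1 ((K : Int) + 1)]
  have hlen : (((K : Int) + 1) - 1).toNat = K := by omega
  rw [hlen, List.map_map, List.range_succ_eq_map, List.map_cons, List.map_map]
  have h0 : pvTgt 0 = 0 := rfl
  rw [h0]
  congr 1
  apply List.map_congr_left
  intro j _
  simp only [Function.comp_apply, pvTgt, pvG, Nat.succ_eq_add_one]
  rw [if_neg (by omega)]
  have hc : (1 : Int) + (j : Int) = ((j + 1 : Nat) : Int) := by push_cast; ring
  rw [hc]

-- ===== VERDICT (by name: the statement is the Claim_ definition above) =====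
theorem camino_operaciones_dinamico_spec : Claim_equal_camino_operaciones_dinamico := by
  intro k _ hpre
  unfold Spec_camino_operaciones_dinamico
  have hk2 : (2 : Int) ≤ k := hpre
  set K := k.toNat with hKdef
  have hkK : (K : Int) = k := Int.toNat_of_nonneg (by omega)
  have hK2 : 2 ≤ K := by omega
  unfold camino_operaciones_dinamico camino_operaciones_dinamico_alt
  have hlen : (k + 1).toNat = K + 1 := by omega
  rw [hlen, pvInit K hK2]
  have hfold := pvFold K (K - 2) 2 (le_refl 2) (by omega)
  have hc3 : ((2 : Nat) : Int) + 1 = 3 := by norm_num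
  rw [hc3, hkK] at hfold
  rw [hfold, ← hkK, pvFinal K]
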